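-- pv_equiv track=rewrite | github.com/alvarogzp/tuenti-challenge-2016 | 01/solution.py | get_min_number_of_tables_for
-- ===== SOURCE A (Python) =====
-- def get_min_number_of_tables_for(number_of_persons):
--     if number_of_persons == 0:
--         return 0
--     number_of_tables = 1
--     persons_with_seat = 4 # one table sits 4 persons
--     while persons_with_seat < number_of_persons:
--         number_of_tables += 1
--         persons_with_seat += 2 # for each new table, 2 more persons sit
--     return number_of_tables
-- ===== SOURCE B (Python) =====
-- def get_min_number_of_tables_for(number_of_persons):
--     if number_of_persons == 0:
--         return 0
--     if number_of_persons <= 4: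
--         return 1
--     return 1 + (number_of_persons - 3) // 2
-- ===== Notes on version B (the rewrite author's own statement) =====
-- stated objective: faster
-- what changed: Replaced the add-two-seats-per-table counting loop by a closed-form ceiling-division formula.
import Mathlib
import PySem

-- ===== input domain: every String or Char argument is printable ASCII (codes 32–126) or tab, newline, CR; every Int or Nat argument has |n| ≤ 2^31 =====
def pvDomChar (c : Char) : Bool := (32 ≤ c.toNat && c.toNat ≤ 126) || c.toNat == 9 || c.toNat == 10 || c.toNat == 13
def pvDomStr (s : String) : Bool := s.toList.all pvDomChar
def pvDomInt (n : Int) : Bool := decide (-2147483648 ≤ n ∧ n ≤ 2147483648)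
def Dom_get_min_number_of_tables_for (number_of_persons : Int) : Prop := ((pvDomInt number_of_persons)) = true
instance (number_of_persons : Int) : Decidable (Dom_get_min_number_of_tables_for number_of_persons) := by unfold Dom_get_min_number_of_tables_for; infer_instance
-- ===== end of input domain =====

-- B replaces A's add-2-per-table counting loop by a closed form (O(1) instead of O(n)).


-- ===== PORT A =====
-- the while-loop of A: while persons_with_seat < number_of_persons: tables += 1; persons += 2
def pvLoopA (n tables persons : Int) : Int :=
  if persons < n then pvLoopA n (tables + 1) (persons + 2) else tables
termination_by (n - persons).toNat
decreasing_by omega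

def get_min_number_of_tables_for (number_of_persons : Int) : Int :=
  if number_of_persons = 0 then 0
  else pvLoopA number_of_persons 1 4

-- ===== PORT B =====
def get_min_number_of_tables_for_alt (number_of_persons : Int) : Int :=
  if number_of_persons = 0 then 0
  else if number_of_persons ≤ 4 then 1
  else 1 + PySem.Int.floordiv (number_of_persons - 3) 2

-- ===== PRECONDITION & SPEC =====
def Spec_get_min_number_of_tables_for (number_of_persons : Int) (out : Int) : Prop := out = get_min_number_of_tables_for_alt number_of_persons
instance (number_of_persons : Int) (out : Int) : Decidable (Spec_get_min_number_of_tables_for number_of_persons out) := by unfold Spec_get_min_number_of_tables_for; infer_instance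

-- ===== CLAIM (what is proved, stated in full; the proofs are below) =====
def Claim_equal_get_min_number_of_tables_for : Prop := ∀ (number_of_persons : Int), Dom_get_min_number_of_tables_for number_of_persons → Spec_get_min_number_of_tables_for number_of_persons (get_min_number_of_tables_for number_of_persons)

-- ===== LEMMAS AND PROOFS =====
-- the loop's result: tables plus the number of further tables still needed, max 0 ⌈(n - persons)/2⌉
theorem pvLoopA_eq (n tables persons : Int) :
    pvLoopA n tables persons = tables + max 0 ((n - persons + 1).fdiv 2) := by
  rw [pvLoopA]
  have h1 : (n - persons + 1).fdiv 2 = (n - persons + 1) / 2 :=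
    Int.fdiv_eq_ediv_of_nonneg _ (by norm_num)
  split
  · rename_i h
    rw [pvLoopA_eq n (tables + 1) (persons + 2)]
    have h2 : (n - (persons + 2) + 1).fdiv 2 = (n - (persons + 2) + 1) / 2 :=
      Int.fdiv_eq_ediv_of_nonneg _ (by norm_num)
    rw [h1, h2]; omega
  · rename_i h
    rw [h1]; omega
termination_by (n - persons).toNat
decreasing_by omega

-- ===== VERDICT (by name: the statement is the Claim_ definition above) =====
theorem get_min_number_of_tables_for_spec : Claim_equal_get_min_number_of_tables_for := by
  intro n _
  unfold Spec_get_min_number_of_tables_for get_min_number_of_tables_for get_min_number_of_tables_for_alt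
  by_cases h0 : n = 0
  · simp [h0]
  · rw [if_neg h0, if_neg h0, pvLoopA_eq]
    have h1 : (n - 4 + 1).fdiv 2 = (n - 4 + 1) / 2 := Int.fdiv_eq_ediv_of_nonneg _ (by norm_num)
    by_cases h4 : n ≤ 4
    · rw [if_pos h4, h1]; omega
    · rw [if_neg h4]
      simp only [PySem.Int.floordiv]
      have h2 : (n - 3).fdiv 2 = (n - 3) / 2 := Int.fdiv_eq_ediv_of_nonneg _ (by norm_num)
      rw [h1, h2]; omega
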